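-- pv_equiv track=rewrite | github.com/ace7chan/leetcode-daily | code/202012/20201207_861_matrixScore.py | matrixScore
-- ===== SOURCE A (Python) =====
-- from typing import List
--
-- def matrixScore(A: List[List[int]]) -> int:
--     row, col = len(A), len(A[0])
--     res = 0
--     for i in range(row):
--         if A[i][0] == 0:
--             A[i] = [1 - a for a in A[i]]
--     res += pow(2, col - 1) * row
--     for j in range(1, col):
--         one_num = sum([1 == A[i][j] for i in range(row)])
--         if one_num >= (row + 1) // 2:
--             res += pow(2, col - j - 1) * one_num
--         else:
--             res += pow(2, col - j - 1) * (row - one_num)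
--     return res
-- ===== SOURCE B (Python) =====
-- def matrixScore(A):
--     # Same in-place row flips as the original (mutates A); then a per-column
--     # flip table and a row-wise binary read of the flipped matrix.
--     row, col = len(A), len(A[0])
--     for i in range(row):
--         if A[i][0] == 0:
--             A[i] = [1 - a for a in A[i]]
--     flip = [False] + [2 * sum(r[j] == 1 for r in A) < row for j in range(1, col)]
--     res = 0
--     for r in A:
--         val = 1 << (col - 1)
--         for j in range(1, col):
--             if (r[j] == 1) != flip[j]:
--                 val += 1 << (col - 1 - j)
--         res += val
--     return res
-- ===== Notes on version B (the rewrite author's own statement) =====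
-- stated objective: alternative
-- what changed: After the shared in-place row flips, A accumulates the score column by column taking the majority count per column, while B precomputes a boolean per-column flip table and then reads the matrix row by row, summing each row's resulting binary value.
import Mathlib
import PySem

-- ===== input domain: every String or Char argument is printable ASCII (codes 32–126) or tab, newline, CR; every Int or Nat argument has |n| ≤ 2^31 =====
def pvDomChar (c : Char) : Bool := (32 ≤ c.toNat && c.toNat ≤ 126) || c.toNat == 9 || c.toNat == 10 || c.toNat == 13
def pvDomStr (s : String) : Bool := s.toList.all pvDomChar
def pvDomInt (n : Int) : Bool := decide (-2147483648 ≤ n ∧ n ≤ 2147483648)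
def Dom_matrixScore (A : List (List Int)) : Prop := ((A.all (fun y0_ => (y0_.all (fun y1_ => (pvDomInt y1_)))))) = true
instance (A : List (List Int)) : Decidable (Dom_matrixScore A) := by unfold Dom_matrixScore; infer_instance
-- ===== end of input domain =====

-- B keeps A's row flips (both Pythons mutate the argument's rows identically; the
-- theorems are about the return value) but replaces A's per-column majority
-- accumulation by a per-column flip table followed by a row-wise binary read.

-- ===== PORT A =====
-- 'for i in range(row): if A[i][0]==0: A[i] = [1-a for a in A[i]]' rebinds each
-- row independently from its own old value; ported as an elementwise map.
def matrixScore (A : List (List Int)) : Int :=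
  let row := A.length
  let col := (A.headD []).length
  let M := A.map (fun r => if r.getD 0 0 == 0 then r.map (fun a => 1 - a) else r)
  let res : Int := 2 ^ (col - 1) * (row : Int)
  (List.range' 1 (col - 1)).foldl (fun res j =>
      let one_num : Int := ((List.range row).filter (fun i => 1 == (M.getD i []).getD j 0)).length
      if one_num ≥ PySem.Int.floordiv ((row : Int) + 1) 2 then
        res + 2 ^ (col - j - 1) * one_num
      else
        res + 2 ^ (col - j - 1) * ((row : Int) - one_num)) res

-- ===== PORT B =====
def matrixScore_alt (A : List (List Int)) : Int :=
  let row := A.length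
  let col := (A.headD []).length
  let M := A.map (fun r => if r.getD 0 0 == 0 then r.map (fun a => 1 - a) else r)
  let flip : List Bool := false :: (List.range' 1 (col - 1)).map
      (fun j => decide (2 * (M.countP (fun r => r.getD j 0 == 1)) < row))
  M.foldl (fun res r =>
    res + ((List.range' 1 (col - 1)).foldl (fun val j =>
        if (r.getD j 0 == 1) != flip.getD j false then val + 2 ^ (col - 1 - j) else val)
      ((2 : Int) ^ (col - 1)))) 0

-- ===== PRECONDITION & SPEC =====
-- Pre_ excludes exactly the inputs where the Python raises IndexError:
-- the empty matrix, and matrices whose first row is empty or longer than some other row.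
def Pre_matrixScore (A : List (List Int)) : Prop :=
  A ≠ [] ∧ 0 < (A.headD []).length ∧ ∀ r ∈ A, (A.headD []).length ≤ r.length
instance (A : List (List Int)) : Decidable (Pre_matrixScore A) := by unfold Pre_matrixScore; infer_instance
def pvWitness_matrixScore : List (List Int) := [[0, 0, 1, 1], [1, 0, 1, 0], [1, 1, 0, 0]]
def Spec_matrixScore (A : List (List Int)) (out : Int) : Prop := out = matrixScore_alt A
instance (A : List (List Int)) (out : Int) : Decidable (Spec_matrixScore A out) := by unfold Spec_matrixScore; infer_instance

-- ===== CLAIM (what is proved, stated in full; the proofs are below) =====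
def Claim_equal_matrixScore : Prop := ∀ (A : List (List Int)), Dom_matrixScore A → Pre_matrixScore A → Spec_matrixScore A (matrixScore A)

-- ===== LEMMAS AND PROOFS =====

-- (range l.length).map (fun i => l.getD i d) = l
theorem pv_map_range_getD {α : Type} (l : List α) (d : α) :
    (List.range l.length).map (fun i => l.getD i d) = l := by
  apply List.ext_getElem
  · simp
  · intro i h1 h2
    simp [List.getD_eq_getElem?_getD, List.getElem?_eq_getElem h2]

-- A's comprehension count over indices is the countP over rows
theorem pv_count_range (M : List (List Int)) (j : Nat) :
    (((List.range M.length).filter (fun i => 1 == (M.getD i []).getD j 0)).length : Int)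
      = (M.countP (fun r => r.getD j 0 == 1) : Int) := by
  have h1 : ((List.range M.length).filter (fun i => 1 == (M.getD i []).getD j 0)).length
      = (List.range M.length).countP (fun i => (M.getD i []).getD j 0 == 1) := by
    rw [List.countP_eq_length_filter]
    congr 1
    apply List.filter_congr
    intro i _
    simp [BEq.comm]
  rw [h1]
  have h2 : (List.range M.length).countP (fun i => (M.getD i []).getD j 0 == 1)
      = List.countP (fun r => r.getD j 0 == 1) ((List.range M.length).map (fun i => M.getD i [])) := by
    rw [List.countP_map]; rfl
  rw [h2, pv_map_range_getD]

-- sum of an ite-constant over a list is the constant times the count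
theorem pv_sum_ite_const {α : Type} (l : List α) (p : α → Bool) (c : Int) :
    (l.map (fun x => if p x then c else 0)).sum = c * (l.countP p : Int) := by
  induction l with
  | nil => simp
  | cons x t ih =>
    by_cases h : p x
    · simp [h, ih]; ring
    · simp [h, ih]

-- exchange of a double list sum
theorem pv_sum_swap {α β : Type} (M : List α) (J : List β) (t : α → β → Int) :
    (M.map (fun r => (J.map (t r)).sum)).sum
      = (J.map (fun j => (M.map (fun r => t r j)).sum)).sum := by
  induction M with
  | nil => simp [List.map_const']
  | cons r T ih =>
    simp only [List.map_cons, List.sum_cons, ih]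
    rw [← PySem.List.sum_map_add_int]

theorem pv_flip_getD (g : Nat → Bool) (m j : Nat) (hj : j ∈ List.range' 1 m) :
    (false :: (List.range' 1 m).map g).getD j false = g j := by
  rw [List.mem_range'] at hj
  obtain ⟨k, hk, rfl⟩ := hj
  have hlen : k < ((List.range' 1 m).map g).length := by simp [hk]
  rw [Nat.one_mul] at *
  rw [Nat.add_comm 1 k, List.getD_cons_succ, List.getD_eq_getElem _ _ hlen]
  simp [Nat.add_comm]

-- the two column contributions agree for every column index
theorem pv_col (M : List (List Int)) (row : Nat) (hrow : M.length = row) (c : Int) (j : Nat) :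
    (M.map (fun r =>
        if (r.getD j 0 == 1) != decide (2 * (M.countP (fun r => r.getD j 0 == 1)) < row)
        then c else 0)).sum
      = (if ((M.countP (fun r => r.getD j 0 == 1) : Int)) ≥ PySem.Int.floordiv ((row : Int) + 1) 2
         then c * (M.countP (fun r => r.getD j 0 == 1) : Int)
         else c * ((row : Int) - (M.countP (fun r => r.getD j 0 == 1) : Int))) := by
  subst hrow
  set p : List Int → Bool := fun r => r.getD j 0 == 1 with hp
  have hfd : PySem.Int.floordiv ((M.length : Int) + 1) 2 = ((M.length : Int) + 1) / 2 := by
    exact PySem.Int.floordiv_eq_ediv_of_pos (by omega)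
  have hcnt : M.countP p ≤ M.length := List.countP_le_length
  by_cases h : 2 * M.countP p < M.length
  · have hge : ¬ ((M.countP p : Int) ≥ ((M.length : Int) + 1) / 2) := by omega
    simp only [h, decide_true, hfd, hge, if_false]
    have h1 : (M.map (fun r => if (p r != true) then c else (0:Int))).sum
        = c * ((M.countP (fun r => !(p r)) : Nat) : Int) := by
      rw [← pv_sum_ite_const M (fun r => !(p r)) c]
      congr 1
      apply List.map_congr_left
      intro r _
      simp
    have h2 : M.countP (fun r => !(p r)) = M.length - M.countP p := by
      have h3 := List.length_eq_countP_add_countP (l := M) p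
      have h4 : M.countP (fun r => !(p r)) = M.countP (fun a => decide ¬ p a = true) := by
        congr 1
        funext a
        simp
      omega
    rw [h1, h2, Nat.cast_sub hcnt]
  · have hge : (M.countP p : Int) ≥ ((M.length : Int) + 1) / 2 := by omega
    simp only [h, decide_false, hfd, hge, if_true]
    have h1 : (M.map (fun r => if (p r != false) then c else (0:Int))).sum
        = c * ((M.countP p : Nat) : Int) := by
      rw [← pv_sum_ite_const M p c]
      congr 1
      apply List.map_congr_left
      intro r _
      simp
    rw [h1]

-- a fold whose step adds a per-element amount is the starting value plus the sum
theorem pv_foldl_add_of {α : Type} (l : List α) (F : Int → α → Int) (f : α → Int) (init : Int)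
    (h : ∀ (acc : Int), ∀ x ∈ l, F acc x = acc + f x) :
    l.foldl F init = init + (l.map f).sum := by
  rw [PySem.List.foldl_congr_mem l F (fun acc x => acc + f x) init h]
  exact PySem.List.foldl_add l f init

theorem pv_main (A : List (List Int)) : matrixScore A = matrixScore_alt A := by
  unfold matrixScore matrixScore_alt
  dsimp only
  set row := A.length with hrow
  set n := (A.headD []).length with hn
  set M := A.map (fun r => if r.getD 0 0 == 0 then r.map (fun a => 1 - a) else r) with hM
  have hlen : M.length = row := by simp [hM, hrow]
  set J := List.range' 1 (n - 1) with hJ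
  set cnt : Nat → Int := fun j => (M.countP (fun r => r.getD j 0 == 1) : Int) with hcnt
  set fd : Int := PySem.Int.floordiv ((row : Int) + 1) 2 with hfd
  set fA : Nat → Int := fun j =>
    if cnt j ≥ fd then 2 ^ (n - j - 1) * cnt j else 2 ^ (n - j - 1) * ((row : Int) - cnt j) with hfA
  set flip : List Bool := false :: J.map
      (fun j => decide (2 * (M.countP (fun r => r.getD j 0 == 1)) < row)) with hflip
  set tB : List Int → Nat → Int := fun r j =>
    if (r.getD j 0 == 1) != flip.getD j false then 2 ^ (n - 1 - j) else 0 with htB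
  -- A's loop as a sum
  have hA : J.foldl (fun res j =>
      if (((List.range row).filter (fun i => 1 == (M.getD i []).getD j 0)).length : Int) ≥ fd then
        res + 2 ^ (n - j - 1) * (((List.range row).filter (fun i => 1 == (M.getD i []).getD j 0)).length : Int)
      else
        res + 2 ^ (n - j - 1) * ((row : Int) - (((List.range row).filter (fun i => 1 == (M.getD i []).getD j 0)).length : Int))) (2 ^ (n - 1) * (row : Int))
      = 2 ^ (n - 1) * (row : Int) + (J.map fA).sum := by
    refine pv_foldl_add_of J _ fA _ ?_
    intro acc j _
    have hc : (((List.range row).filter (fun i => 1 == (M.getD i []).getD j 0)).length : Int)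
        = cnt j := by rw [← hlen]; exact pv_count_range M j
    rw [hc, hfA]
    beta_reduce
    split_ifs with hcond
    · ring
    · ring
  -- B's inner loop as a sum
  have hB1 : ∀ r : List Int, J.foldl (fun val j =>
      if (r.getD j 0 == 1) != flip.getD j false then val + 2 ^ (n - 1 - j) else val)
      ((2 : Int) ^ (n - 1)) = 2 ^ (n - 1) + (J.map (tB r)).sum := by
    intro r
    refine pv_foldl_add_of J _ (tB r) _ ?_
    intro acc j _
    rw [htB]
    beta_reduce
    split_ifs with hcond
    · ring
    · ring
  -- B's outer loop
  have hB : M.foldl (fun res r => res + (J.foldl (fun val j =>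
      if (r.getD j 0 == 1) != flip.getD j false then val + 2 ^ (n - 1 - j) else val)
      ((2 : Int) ^ (n - 1)))) 0
      = (row : Int) * 2 ^ (n - 1) + (J.map (fun j => (M.map (fun r => tB r j)).sum)).sum := by
    rw [pv_foldl_add_of M _ (fun r => 2 ^ (n - 1) + (J.map (tB r)).sum) 0
      (by intro acc r _; dsimp only; rw [hB1 r])]
    rw [PySem.List.sum_map_add_int]
    rw [← pv_sum_swap]
    have : (M.map (fun _ => (2:Int) ^ (n - 1))).sum = (row : Int) * 2 ^ (n - 1) := by
      rw [List.map_const', List.sum_replicate, hlen]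
      simp
    rw [this]
    ring
  rw [hA, hB]
  -- per-column equality
  have hcol : ∀ j ∈ J, (M.map (fun r => tB r j)).sum = fA j := by
    intro j hj
    have hg : flip.getD j false
        = decide (2 * (M.countP (fun r => r.getD j 0 == 1)) < row) := by
      rw [hflip, hJ]
      exact pv_flip_getD _ (n - 1) j (hJ ▸ hj)
    have he : n - 1 - j = n - j - 1 := by omega
    simp only [htB, hg, he]
    rw [pv_col M row hlen (2 ^ (n - j - 1)) j]
  rw [List.map_congr_left hcol]
  ring

-- ===== VERDICT (by name: the statement is the Claim_ definition above) =====
theorem matrixScore_spec : Claim_equal_matrixScore := by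
  intro A _ _
  show matrixScore A = matrixScore_alt A
  exact pv_main A
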